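-- pv_equiv track=rewrite | github.com/DashiellRussell/mpr-altitude-logger | tests/sim_harness.py | intermittent_dropout
-- ===== SOURCE A (Python) =====
-- SENSOR_FAULT = None
--
-- def intermittent_dropout(base, intervals):
--     """Multiple sensor dropout windows.
--
--     intervals: list of (start_frame, duration) tuples.
--     """
--     for i, val in enumerate(base):
--         is_fault = False
--         for start, dur in intervals:
--             if start <= i < start + dur:
--                 is_fault = True
--                 break
--         yield SENSOR_FAULT if is_fault else val
-- ===== SOURCE B (Python) =====
-- SENSOR_FAULT = None
--
-- def intermittent_dropout(base, intervals):
--     """Multiple sensor dropout windows (difference-array sweep, O(n + m))."""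
--     n = len(base)
--     diff = [0] * (n + 1)
--     for start, dur in intervals:
--         lo = min(max(start, 0), n)
--         hi = min(max(start + dur, lo), n)
--         diff[lo] += 1
--         diff[hi] -= 1
--     depth = 0
--     for val, d in zip(base, diff):
--         depth += d
--         yield SENSOR_FAULT if depth > 0 else val
-- ===== Notes on version B (the rewrite author's own statement) =====
-- stated objective: faster
-- what changed: Replaces the per-frame rescan of all intervals by a clamped difference array built once over the intervals, followed by a single running-sum sweep over the frames.
import Mathlib
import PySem

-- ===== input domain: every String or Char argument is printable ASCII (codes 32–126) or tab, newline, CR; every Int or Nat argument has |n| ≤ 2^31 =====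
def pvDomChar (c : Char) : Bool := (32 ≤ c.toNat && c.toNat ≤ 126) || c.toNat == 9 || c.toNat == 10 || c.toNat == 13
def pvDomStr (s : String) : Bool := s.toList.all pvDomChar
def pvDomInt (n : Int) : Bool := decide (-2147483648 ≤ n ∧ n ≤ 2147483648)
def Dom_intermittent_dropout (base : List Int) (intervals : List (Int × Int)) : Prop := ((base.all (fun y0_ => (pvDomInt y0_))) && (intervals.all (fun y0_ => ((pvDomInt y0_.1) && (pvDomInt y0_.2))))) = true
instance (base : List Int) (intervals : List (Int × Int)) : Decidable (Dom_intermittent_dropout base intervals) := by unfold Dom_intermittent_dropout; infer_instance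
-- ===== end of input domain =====

-- B replaces A's per-frame rescan of every interval by a clamped difference array built once
-- over the intervals and a single running-sum sweep over the frames (equivalence of the
-- produced sequence of values; both Pythons are generators).

-- ===== PORT A =====
-- inner 'for start, dur in intervals' loop with break: true at the first covering interval
def pvInnerA (i : Int) : List (Int × Int) → Bool
  | [] => false
  | (s, d) :: rest => if s ≤ i ∧ i < s + d then true else pvInnerA i rest

-- outer 'for i, val in enumerate(base)' loop, yielding one value per frame
def pvOuterA (intervals : List (Int × Int)) : List Int → Int → List (Option Int)
  | [], _ => []
  | v :: vs, i => (if pvInnerA i intervals then none else some v) :: pvOuterA intervals vs (i + 1)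

def intermittent_dropout (base : List Int) (intervals : List (Int × Int)) : List (Option Int) :=
  pvOuterA intervals base 0

-- ===== PORT B =====
-- one interval's two difference-array updates (indices clamped into [0, n], hi ≥ lo)
def pvStep (n : Int) (d : List Int) (iv : Int × Int) : List Int :=
  let lo := (min (max iv.1 0) n).toNat
  let hi := (min (max (iv.1 + iv.2) (min (max iv.1 0) n)) n).toNat
  let d1 := d.set lo (d.getD lo 0 + 1)
  d1.set hi (d1.getD hi 0 - 1)

-- 'for val, d in zip(base, diff): depth += d; yield …'
def pvSweep : List Int → List Int → Int → List (Option Int)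
  | [], _, _ => []
  | _ :: _, [], _ => []
  | v :: vs, d :: ds, depth =>
    let depth' := depth + d
    (if depth' > 0 then none else some v) :: pvSweep vs ds depth'

def intermittent_dropout_alt (base : List Int) (intervals : List (Int × Int)) : List (Option Int) :=
  let n := base.length
  let diff := intervals.foldl (pvStep (n : Int)) (List.replicate (n + 1) 0)
  pvSweep base diff 0

-- ===== PRECONDITION & SPEC =====
def Spec_intermittent_dropout (base : List Int) (intervals : List (Int × Int)) (out : List (Option Int)) : Prop := out = intermittent_dropout_alt base intervals
instance (base : List Int) (intervals : List (Int × Int)) (out : List (Option Int)) : Decidable (Spec_intermittent_dropout base intervals out) := by unfold Spec_intermittent_dropout; infer_instance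

-- ===== CLAIM (what is proved, stated in full; the proofs are below) =====
def Claim_equal_intermittent_dropout : Prop := ∀ (base : List Int) (intervals : List (Int × Int)), Dom_intermittent_dropout base intervals → Spec_intermittent_dropout base intervals (intermittent_dropout base intervals)

-- ===== LEMMAS AND PROOFS =====

-- number of intervals covering frame i
def pvCnt (ivs : List (Int × Int)) (i : Int) : Nat :=
  ivs.countP (fun iv => decide (iv.1 ≤ i ∧ i < iv.1 + iv.2))

theorem pvInnerA_iff (i : Int) (ivs : List (Int × Int)) :
    pvInnerA i ivs = true ↔ 0 < pvCnt ivs i := by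
  induction ivs with
  | nil => simp [pvInnerA, pvCnt]
  | cons iv rest ih =>
    obtain ⟨s, d⟩ := iv
    by_cases h : s ≤ i ∧ i < s + d <;>
      simp [pvInnerA, pvCnt, h, List.countP_cons] at * <;> omega

theorem pvStep_length (n : Int) (d : List Int) (iv : Int × Int) :
    (pvStep n d iv).length = d.length := by
  simp [pvStep]

theorem pv_sum_take_set (d : List Int) (j k : Nat) (c : Int) (hj : j < d.length) :
    ((d.set j (d.getD j 0 + c)).take k).sum
      = (d.take k).sum + (if j < k then c else 0) := by
  induction d generalizing j k with
  | nil => simp at hj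
  | cons a t ih =>
    cases j with
    | zero =>
      cases k with
      | zero => simp
      | succ s => simp [List.set, List.take_succ_cons]; ring
    | succ m =>
      cases k with
      | zero => simp
      | succ s =>
        simp only [List.getD_cons_succ, List.set_cons_succ, List.take_succ_cons,
          List.sum_cons]
        rw [ih m s (by simpa using hj)]
        have : m + 1 < s + 1 ↔ m < s := by omega
        rw [if_congr this rfl rfl]; ring

theorem pv_psum_step (n : Nat) (d : List Int) (iv : Int × Int)
    (hd : d.length = n + 1) (i : Nat) (hi : i < n) :
    ((pvStep (n : Int) d iv).take (i + 1)).sum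
      = (d.take (i + 1)).sum
        + (if iv.1 ≤ (i : Int) ∧ (i : Int) < iv.1 + iv.2 then 1 else 0) := by
  obtain ⟨s, dur⟩ := iv
  simp only [pvStep]
  set L : Int := min (max s 0) (n : Int) with hL
  set H : Int := min (max (s + dur) L) (n : Int) with hH
  have hLlt : L.toNat < d.length := by omega
  have hHlt' : H.toNat < (d.set L.toNat (d.getD L.toNat 0 + 1)).length := by
    simp only [List.length_set]; omega
  have e1 := pv_sum_take_set d L.toNat (i + 1) 1 hLlt
  have e2 := pv_sum_take_set (d.set L.toNat (d.getD L.toNat 0 + 1)) H.toNat (i + 1) (-1) hHlt'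
  have hsub : ∀ x : Int, x + (-1) = x - 1 := fun x => by ring
  rw [hsub] at e2
  rw [e2, e1]
  generalize (List.take (i + 1) d).sum = S
  split_ifs <;> omega

theorem pv_psum_foldl (n : Nat) (ivs : List (Int × Int)) (d : List Int)
    (hd : d.length = n + 1) (i : Nat) (hi : i < n) :
    ((ivs.foldl (pvStep (n : Int)) d).take (i + 1)).sum
      = (d.take (i + 1)).sum + (pvCnt ivs (i : Int) : Int) := by
  induction ivs generalizing d with
  | nil => simp [pvCnt]
  | cons iv rest ih =>
    simp only [List.foldl_cons]
    rw [ih (pvStep (n : Int) d iv) (by rw [pvStep_length]; exact hd),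
      pv_psum_step n d iv hd i hi]
    simp [pvCnt, List.countP_cons]
    split_ifs <;> push_cast <;> ring

theorem pv_foldl_length (n : Nat) (ivs : List (Int × Int)) (d : List Int) :
    (ivs.foldl (pvStep (n : Int)) d).length = d.length := by
  induction ivs generalizing d with
  | nil => rfl
  | cons iv rest ih => simp [List.foldl_cons, ih, pvStep_length]

theorem pv_sweep_eq (n : Nat) (ivs : List (Int × Int)) (dF : List Int)
    (hlen : dF.length = n + 1)
    (hsum : ∀ i : Nat, i < n → ((dF.take (i + 1)).sum) = (pvCnt ivs (i : Int) : Int)) :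
    ∀ (vs : List Int) (k : Nat), k + vs.length = n →
      pvSweep vs (dF.drop k) ((dF.take k).sum) = pvOuterA ivs vs (k : Int) := by
  intro vs
  induction vs with
  | nil => intro k hk; cases h : dF.drop k <;> simp [pvSweep, pvOuterA]
  | cons v vs ih =>
    intro k hk
    have hkn : k < n := by simp at hk; omega
    have hkd : k < dF.length := by omega
    rw [List.drop_eq_getElem_cons hkd]
    simp only [pvSweep, pvOuterA]
    have hdep : (dF.take k).sum + dF[k] = (dF.take (k + 1)).sum := by
      exact (List.sum_take_succ dF k hkd).symm
    rw [hdep, hsum k hkn]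
    congr 1
    · by_cases h : pvInnerA (k : Int) ivs = true
      · have hp := (pvInnerA_iff (k : Int) ivs).mp h
        rw [if_pos (by exact_mod_cast hp), h, if_pos rfl]
      · have hc : ¬ 0 < pvCnt ivs (k : Int) := fun hp => h ((pvInnerA_iff _ _).mpr hp)
        rw [if_neg (by exact_mod_cast hc), if_neg (by simp [h])]
    · have hih := ih (k + 1) (by simp at hk ⊢; omega)
      rw [hsum k hkn] at hih
      rw [show ((k : Int) + 1) = ((k + 1 : Nat) : Int) by push_cast; ring]
      exact hih

-- ===== VERDICT (by name: the statement is the Claim_ definition above) =====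
theorem intermittent_dropout_spec : Claim_equal_intermittent_dropout := by
  intro base intervals _
  unfold Spec_intermittent_dropout intermittent_dropout intermittent_dropout_alt
  set n := base.length with hn
  set dF := intervals.foldl (pvStep (n : Int)) (List.replicate (n + 1) 0) with hdF
  have hlen : dF.length = n + 1 := by
    rw [hdF, pv_foldl_length]; simp
  have hsum : ∀ i : Nat, i < n → ((dF.take (i + 1)).sum) = (pvCnt intervals (i : Int) : Int) := by
    intro i hi
    rw [hdF, pv_psum_foldl n intervals _ (by simp) i hi]
    simp [List.take_replicate]
  have := pv_sweep_eq n intervals dF hlen hsum base 0 (by simp [hn])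
  simpa using this.symm
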